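-- pv_equiv track=rewrite | github.com/fp-computer-programming/cycle-10-labs-p22jdiao | cycle-10-labs-2.py | five_divi
-- ===== SOURCE A (Python) =====
-- def five_divi(lst):
--     new = []
--     for x in lst:
--         if x > 500:
--             break
--         elif x % 5 == 0 and x <= 150:
--             new.append(x)
--
--     return(new)
-- ===== SOURCE B (Python) =====
-- def _segment(seg):
--     # divide and conquer: returns (kept values of seg in order, whether a >500 cutoff was hit in seg)
--     if len(seg) == 1:
--         x = seg[0]
--         if x > 500:
--             return [], True
--         return ([x] if x % 5 == 0 and x <= 150 else []), False
--     mid = len(seg) // 2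
--     left, stopped = _segment(seg[:mid])
--     if stopped:
--         return left, True
--     right, stopped = _segment(seg[mid:])
--     return left + right, stopped
--
-- def five_divi(lst):
--     if not lst:
--         return []
--     return _segment(lst)[0]
-- ===== Notes on version B (the rewrite author's own statement) =====
-- stated objective: alternative
-- what changed: Replaced the single guarded loop with break by a divide-and-conquer recursion over list halves that returns (kept values, stopped flag) per segment and propagates the cutoff flag left to right.
import Mathlib
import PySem

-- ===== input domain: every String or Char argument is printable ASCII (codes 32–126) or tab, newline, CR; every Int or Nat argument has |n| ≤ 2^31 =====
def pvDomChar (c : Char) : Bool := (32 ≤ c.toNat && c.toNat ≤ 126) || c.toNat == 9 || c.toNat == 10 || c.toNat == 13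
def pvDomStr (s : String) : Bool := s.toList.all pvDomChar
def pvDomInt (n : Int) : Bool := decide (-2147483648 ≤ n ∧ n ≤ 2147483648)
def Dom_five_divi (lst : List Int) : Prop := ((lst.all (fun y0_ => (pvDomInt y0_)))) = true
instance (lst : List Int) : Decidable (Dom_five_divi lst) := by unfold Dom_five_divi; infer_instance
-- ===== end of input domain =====

-- B replaces A's guarded loop-with-break by a divide-and-conquer recursion over list halves
-- carrying a (kept, stopped) pair (alternative decomposition, similar cost).

-- ===== PORT A =====
-- loop with break: structural recursion over lst carrying the accumulator `new`
def five_divi_loop (new : List Int) : List Int → List Int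
  | [] => new
  | x :: rest =>
    if x > 500 then new
    else if PySem.Int.mod x 5 = 0 ∧ x ≤ 150 then five_divi_loop (new ++ [x]) rest
    else five_divi_loop new rest

def five_divi (lst : List Int) : List Int := five_divi_loop [] lst

-- ===== PORT B =====
-- _segment: divide and conquer on halves; returns (kept values, whether a >500 cutoff was hit).
-- (the [] branch is a totality guard only: _segment is never reached with an empty segment)
def five_divi_segment (seg : List Int) : List Int × Bool :=
  match seg with
  | [] => ([], false)
  | [x] =>
    if x > 500 then ([], true)
    else if PySem.Int.mod x 5 = 0 ∧ x ≤ 150 then ([x], false) else ([], false)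
  | a :: b :: t =>
    let s := a :: b :: t
    let mid := s.length / 2
    let lres := five_divi_segment (s.take mid)
    if lres.2 then (lres.1, true)
    else
      let rres := five_divi_segment (s.drop mid)
      (lres.1 ++ rres.1, rres.2)
termination_by seg.length
decreasing_by
  · simp; omega
  · simp; omega

def five_divi_alt (lst : List Int) : List Int :=
  if lst = [] then [] else (five_divi_segment lst).1

-- ===== PRECONDITION & SPEC =====
def Spec_five_divi (lst : List Int) (out : List Int) : Prop := out = five_divi_alt lst
instance (lst : List Int) (out : List Int) : Decidable (Spec_five_divi lst out) := by unfold Spec_five_divi; infer_instance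

-- ===== CLAIM =====
def Claim_equal_five_divi : Prop := ∀ (lst : List Int), Dom_five_divi lst → Spec_five_divi lst (five_divi lst)

-- ===== LEMMAS AND PROOFS =====
theorem five_divi_loop_eq (lst : List Int) (acc : List Int) :
    five_divi_loop acc lst =
      acc ++ (lst.takeWhile (fun x => x ≤ 500)).filter (fun x => PySem.Int.mod x 5 = 0 ∧ x ≤ 150) := by
  induction lst generalizing acc with
  | nil => simp [five_divi_loop]
  | cons x rest ih =>
    by_cases h : x > 500
    · simp [five_divi_loop, h, show ¬ (x ≤ 500) by omega]
    · have h' : x ≤ 500 := by omega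
      by_cases hk : PySem.Int.mod x 5 = 0 ∧ x ≤ 150
      · simp [five_divi_loop, h, hk, ih, h', List.filter_cons]
        split <;> simp
      · simp [five_divi_loop, h, ih, h', List.filter_cons]
        split <;> simp

theorem five_divi_segment_eq (n : Nat) (seg : List Int) (hn : seg.length ≤ n) :
    five_divi_segment seg =
      ((seg.takeWhile (fun x => x ≤ 500)).filter (fun x => PySem.Int.mod x 5 = 0 ∧ x ≤ 150),
       seg.any (fun x => 500 < x)) := by
  induction n generalizing seg with
  | zero =>
    have : seg = [] := List.eq_nil_of_length_eq_zero (by omega)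
    subst this; simp [five_divi_segment]
  | succ n ih =>
    match seg with
    | [] => simp [five_divi_segment]
    | [x] =>
      by_cases h : x > 500
      · simp [five_divi_segment, h, show ¬ (x ≤ 500) by omega]
      · have h' : x ≤ 500 := by omega
        by_cases hk : PySem.Int.mod x 5 = 0 ∧ x ≤ 150 <;>
          · rw [five_divi_segment]
            simp [h, h', hk, List.takeWhile, List.filter]
            split <;> simp_all <;>
              (by_cases hd : (5:Int) ∣ x <;> simp_all) <;>
              simp [show ¬ (x ≤ 150) by omega]
    | a :: b :: t =>
      rw [five_divi_segment]
      simp only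
      have h2 : (a :: b :: t).length = t.length + 2 := by simp
      have hmid1 : 1 ≤ (a :: b :: t).length / 2 := by omega
      have hmid2 : (a :: b :: t).length / 2 < (a :: b :: t).length := by omega
      have hlt : ((a :: b :: t).take ((a :: b :: t).length / 2)).length ≤ n := by
        simp at hn ⊢; omega
      have hrt : ((a :: b :: t).drop ((a :: b :: t).length / 2)).length ≤ n := by
        simp at hn ⊢; omega
      rw [ih _ hlt, ih _ hrt]
      have hsplit : (a :: b :: t).take ((a :: b :: t).length / 2) ++
          (a :: b :: t).drop ((a :: b :: t).length / 2) = (a :: b :: t) :=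
        List.take_append_drop _ _
      set L := (a :: b :: t).take ((a :: b :: t).length / 2) with hL
      set R := (a :: b :: t).drop ((a :: b :: t).length / 2) with hR
      by_cases hs : L.any (fun x => 500 < x)
      · -- cutoff in the left half: takeWhile and any of the whole list are those of L
        have hall : ¬ ∀ x ∈ L, ((x ≤ 500 : Prop) : Bool) = true := by
          simp only [List.any_eq_true] at hs
          obtain ⟨x, hx, hx5⟩ := hs
          intro hall
          have := hall x hx
          simp at this hx5; omega
        have htw : (L.takeWhile (fun x => ((x ≤ 500 : Prop) : Bool))).length ≠ L.length := by
          intro hlen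
          exact hall (List.takeWhile_eq_self_iff.mp
            ((List.takeWhile_sublist _).eq_of_length hlen))
        conv_rhs => rw [← hsplit]
        rw [List.takeWhile_append, List.any_append]
        simp [hs, htw]
      · -- left half is clean: results concatenate and the flag comes from R
        have hall : ∀ x ∈ L, ((x ≤ 500 : Prop) : Bool) = true := by
          simp only [List.any_eq_true] at hs
          intro x hx
          simp only [decide_eq_true_eq]
          by_contra hc
          exact hs ⟨x, hx, by simp; omega⟩
        have htw : L.takeWhile (fun x => ((x ≤ 500 : Prop) : Bool)) = L :=
          List.takeWhile_eq_self_iff.mpr hall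
        conv_rhs => rw [← hsplit]
        rw [List.takeWhile_append_of_pos hall, List.any_append, List.filter_append]
        simp [hs, htw]

-- ===== VERDICT =====
theorem five_divi_spec : Claim_equal_five_divi := by
  intro lst _
  unfold Spec_five_divi five_divi five_divi_alt
  rcases lst with _ | ⟨x, rest⟩
  · simp [five_divi_loop]
  · rw [five_divi_segment_eq (x :: rest).length _ le_rfl]
    simpa using five_divi_loop_eq (x :: rest) []
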